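-- pv_equiv track=rewrite | github.com/h000/algorithms | programmers/숫자게임.py | solution
-- ===== SOURCE A (Python) =====
-- def solution(A, B):
--     answer = 0
--     A.sort()
--     B.sort()
--     i = len(A) - 1
--     j = len(B) - 1
--     while i >= 0 and j >= 0:
--         if A[i] < B[j]:
--             answer += 1
--             i -= 1
--             j -= 1
--         else:
--             i -= 1
--     return answer
-- ===== SOURCE B (Python) =====
-- def solution(A, B):
--     A.sort()
--     B.sort()
--     ca = {}
--     for a in A:
--         ca[a] = ca.get(a, 0) + 1
--     cb = {}
--     for b in B:
--         cb[b] = cb.get(b, 0) + 1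
--     answer = 0
--     avail = 0
--     for v in sorted(set(A) | set(B)):
--         m = min(avail, cb.get(v, 0))
--         answer += m
--         avail += ca.get(v, 0) - m
--     return answer
-- ===== Notes on version B (the rewrite author's own statement) =====
-- stated objective: alternative
-- what changed: Replaces A's element-wise two-pointer greedy over the sorted lists with value-based counting: build frequency dicts of A and B, then sweep the distinct values ascending, matching each value's B-cards in bulk (min of the available-smaller-A pool and B's count at that value).
import Mathlib
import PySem

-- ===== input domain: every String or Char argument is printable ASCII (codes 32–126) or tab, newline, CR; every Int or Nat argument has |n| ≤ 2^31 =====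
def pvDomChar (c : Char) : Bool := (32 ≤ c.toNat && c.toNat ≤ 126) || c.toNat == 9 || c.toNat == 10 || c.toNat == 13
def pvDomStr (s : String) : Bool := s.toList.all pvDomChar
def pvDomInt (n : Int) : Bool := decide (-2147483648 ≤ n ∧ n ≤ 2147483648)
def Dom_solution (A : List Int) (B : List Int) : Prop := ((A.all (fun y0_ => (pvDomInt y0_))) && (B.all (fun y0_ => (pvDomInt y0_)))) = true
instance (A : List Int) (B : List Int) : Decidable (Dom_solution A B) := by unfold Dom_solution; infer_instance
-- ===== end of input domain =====

-- B replaces A's element-wise two-pointer greedy with value-based counting: frequency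
-- dicts of A and B, then one sweep over the distinct values ascending, matching B's cards
-- at each value in bulk (alternative decomposition, same cost). Both Pythons sort A and B
-- in place; the equivalence proved here is about the return value only (the mutations are
-- identical).

-- ===== PORT A =====
-- the while loop: state (i, j, answer); the Nat fuel only guards totality
-- ((i+1).toNat + (j+1).toNat, the loop's exact step bound, never runs out)
def solutionLoop (sa sb : List Int) : Nat → Int → Int → Int → Int
  | 0, _i, _j, answer => answer
  | fuel + 1, i, j, answer =>
    if i ≥ 0 ∧ j ≥ 0 then
      if PySem.List.pyGetD sa i 0 < PySem.List.pyGetD sb j 0 then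
        solutionLoop sa sb fuel (i - 1) (j - 1) (answer + 1)
      else
        solutionLoop sa sb fuel (i - 1) j answer
    else answer

def solution (A : List Int) (B : List Int) : Int :=
  let sa := PySem.List.sorted A (fun x => x) false
  let sb := PySem.List.sorted B (fun x => x) false
  solutionLoop sa sb (sa.length + sb.length)
    (PySem.List.len sa - 1) (PySem.List.len sb - 1) 0

-- ===== PORT B =====
def solution_alt (A : List Int) (B : List Int) : Int :=
  let sa := PySem.List.sorted A (fun x => x) false
  let sb := PySem.List.sorted B (fun x => x) false
  let ca := sa.foldl (fun d x => d.modify x 0 (· + 1)) (PySem.Dict.empty : PySem.Dict Int Int)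
  let cb := sb.foldl (fun d x => d.modify x 0 (· + 1)) (PySem.Dict.empty : PySem.Dict Int Int)
  let vs := PySem.List.sorted (PySem.Set.union (PySem.Set.ofList sa) sb) (fun x => x) false
  (vs.foldl
    (fun s v =>
      let m := min s.2 (cb.getD v 0)
      (s.1 + m, s.2 + (ca.getD v 0 - m)))
    ((0 : Int), (0 : Int))).1

-- ===== PRECONDITION & SPEC =====
def Spec_solution (A : List Int) (B : List Int) (out : Int) : Prop := out = solution_alt A B
instance (A : List Int) (B : List Int) (out : Int) : Decidable (Spec_solution A B out) := by unfold Spec_solution; infer_instance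

-- ===== CLAIM (what is proved, stated in full; the proofs are below) =====
def Claim_equal_solution : Prop := ∀ (A : List Int) (B : List Int), Dom_solution A B → Spec_solution A B (solution A B)

-- ===== LEMMAS AND PROOFS =====

-- `rest a b`: the part of a (ascending) left unmatched after greedily serving b ascending
def rest : List Int → List Int → List Int
  | a, [] => a
  | [], _ :: _ => []
  | x :: a, y :: b => if x < y then rest a b else rest (x :: a) b
termination_by _ b => b.length

-- match count of the greedy over ascending lists, as an Int
def gInt (a b : List Int) : Int := (a.length : Int) - ((rest a b).length : Int)

-- A's loop read back-to-front on descending lists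
def frec : List Int → List Int → Int
  | [], _ => 0
  | _ :: _, [] => 0
  | x :: ra, y :: rb => if x < y then 1 + frec ra rb else frec ra (y :: rb)
termination_by ra _ => ra.length

theorem rest_nil_left (b : List Int) : rest [] b = [] := by
  cases b <;> simp [rest]

theorem rest_nil_right (a : List Int) : rest a [] = a := by
  cases a <;> simp [rest]

theorem frec_nil_right (a : List Int) : frec a [] = 0 := by
  cases a <;> simp [frec]

theorem rest_snoc_left (b a : List Int) (x : Int) :
    (rest (a ++ [x]) b = [] ∧ rest a b = []) ∨
      ((rest (a ++ [x]) b).length = (rest a b).length + 1) := by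
  induction b generalizing a with
  | nil => right; simp [rest_nil_right]
  | cons y b ih =>
    cases a with
    | nil =>
      simp only [List.nil_append]
      by_cases hxy : x < y
      · left
        constructor
        · simp [rest, hxy, rest_nil_left]
        · simp [rest]
      · have := ih ([] : List Int)
        simp only [List.nil_append, rest_nil_left] at this
        rcases this with ⟨h1, _⟩ | h2
        · left; exact ⟨by simp [rest, hxy, h1], by simp [rest]⟩
        · right; simp [rest, hxy, rest_nil_left] at h2 ⊢; omega
    | cons z a' =>
      by_cases hzy : z < y
      · simpa [rest, hzy] using ih a'
      · simpa [rest, hzy] using ih (z :: a')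

theorem rest_snoc_right (b a : List Int) (y : Int) :
    rest a (b ++ [y]) =
      match rest a b with
      | [] => []
      | h :: t => if h < y then t else h :: t := by
  induction b generalizing a with
  | nil =>
    cases a with
    | nil => simp [rest]
    | cons h t => simp [rest, rest_nil_right]
  | cons z b ih =>
    cases a with
    | nil => simp [rest_nil_left]
    | cons h t =>
      by_cases hz : h < z
      · simpa [rest, hz] using ih t
      · simpa [rest, hz] using ih (h :: t)

theorem mem_rest (b a : List Int) (h : Int) (hm : h ∈ rest a b) : h ∈ a := by
  induction b generalizing a with
  | nil => simpa [rest_nil_right] using hm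
  | cons y b ih =>
    cases a with
    | nil => simp [rest_nil_left] at hm
    | cons x a' =>
      by_cases hxy : x < y
      · simp only [rest, if_pos hxy] at hm
        exact List.mem_cons_of_mem _ (ih a' hm)
      · simp only [rest, if_neg hxy] at hm
        exact ih (x :: a') hm

theorem rest_snoc_left_big (b a : List Int) (x : Int) (hb : ∀ z ∈ b, z ≤ x) :
    rest (a ++ [x]) b = rest a b ++ [x] := by
  induction b generalizing a with
  | nil => simp [rest_nil_right]
  | cons y b ih =>
    have hyx : ¬ x < y := by
      have := hb y (by simp)
      omega
    cases a with
    | nil =>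
      simp only [List.nil_append, rest, if_neg hyx]
      rw [show ([x] : List Int) = [] ++ [x] by simp,
        ih [] (fun z hz => hb z (by simp [hz]))]
      simp [rest_nil_left]
    | cons z a' =>
      by_cases hzy : z < y
      · simpa [rest, hzy] using ih a' (fun w hw => hb w (by simp [hw]))
      · simpa [rest, hzy] using ih (z :: a') (fun w hw => hb w (by simp [hw]))

theorem gInt_snoc_match (a b : List Int) (x y : Int) (ha : ∀ h ∈ a, h ≤ x) (hxy : x < y) :
    gInt (a ++ [x]) (b ++ [y]) = 1 + gInt a b := by
  unfold gInt
  rw [rest_snoc_right]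
  rcases rest_snoc_left b a x with ⟨h1, h2⟩ | hlen
  · simp [h1, h2]; omega
  · cases hr : rest (a ++ [x]) b with
    | nil => simp [hr] at hlen
    | cons h t =>
      have hhx : h ≤ x := by
        have hmem := mem_rest b (a ++ [x]) h (by simp [hr])
        rcases List.mem_append.mp hmem with hma | hmx
        · exact ha h hma
        · simp at hmx; omega
      have hhy : h < y := by omega
      simp only [if_pos hhy]
      rw [hr] at hlen
      simp only [List.length_cons, List.length_append, List.length_nil] at hlen ⊢
      omega

theorem gInt_snoc_skip (a b : List Int) (x : Int) (hb : ∀ z ∈ b, z ≤ x) :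
    gInt (a ++ [x]) b = gInt a b := by
  unfold gInt
  rw [rest_snoc_left_big b a x hb]
  simp

theorem frec_eq_gInt (ra : List Int) : ∀ rb : List Int,
    ra.Pairwise (fun p q => q ≤ p) → rb.Pairwise (fun p q => q ≤ p) →
    frec ra rb = gInt ra.reverse rb.reverse := by
  induction ra with
  | nil =>
    intro rb _ _
    simp [frec, gInt, rest_nil_left]
  | cons x ra' ih =>
    intro rb hra hrb
    cases rb with
    | nil => simp [frec_nil_right, gInt, rest_nil_right]
    | cons y rb' =>
      rw [List.pairwise_cons] at hra hrb
      obtain ⟨hx, hra'⟩ := hra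
      obtain ⟨hy, hrb'⟩ := hrb
      by_cases hxy : x < y
      · simp only [frec, if_pos hxy, List.reverse_cons]
        rw [ih rb' hra' hrb',
          gInt_snoc_match _ _ x y (fun h hm => hx h (List.mem_reverse.mp hm)) hxy]
      · simp only [frec, if_neg hxy, List.reverse_cons]
        rw [ih (y :: rb') hra' (List.pairwise_cons.mpr ⟨hy, hrb'⟩)]
        simp only [List.reverse_cons]
        rw [gInt_snoc_skip]
        intro z hz
        rcases List.mem_append.mp hz with hz' | hz'
        · have := hy z (List.mem_reverse.mp hz')
          omega
        · simp at hz'; omega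

-- bridge: A's while loop computes frec of the processed prefixes, reversed
theorem solutionLoop_eq_frec (sa sb : List Int) (fuel : Nat) :
    ∀ (i j ans : Int), (i + 1).toNat + (j + 1).toNat ≤ fuel →
    i < sa.length → j < sb.length →
    solutionLoop sa sb fuel i j ans =
      ans + frec ((sa.take (i + 1).toNat).reverse) ((sb.take (j + 1).toNat).reverse) := by
  induction fuel with
  | zero =>
    intro i j ans hf _ _
    have hi0 : (i + 1).toNat = 0 := by omega
    simp [solutionLoop, hi0, frec]
  | succ fuel ih =>
    intro i j ans hf hi hj
    by_cases hpos : i ≥ 0 ∧ j ≥ 0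
    · obtain ⟨hi0, hj0⟩ := hpos
      have hti : (i + 1).toNat = i.toNat + 1 := by omega
      have htj : (j + 1).toNat = j.toNat + 1 := by omega
      have hti' : i.toNat < sa.length := by omega
      have htj' : j.toNat < sb.length := by omega
      have hta : sa.take (i.toNat + 1) = sa.take i.toNat ++ [sa[i.toNat]] :=
        List.take_succ_eq_append_getElem hti'
      have htb : sb.take (j.toNat + 1) = sb.take j.toNat ++ [sb[j.toNat]] :=
        List.take_succ_eq_append_getElem htj'
      have hga : PySem.List.pyGetD sa i 0 = sa[i.toNat] :=
        PySem.List.pyGetD_eq_getElem _ _ hi0 (by simpa [PySem.List.len_eq] using hi)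
      have hgb : PySem.List.pyGetD sb j 0 = sb[j.toNat] :=
        PySem.List.pyGetD_eq_getElem _ _ hj0 (by simpa [PySem.List.len_eq] using hj)
      by_cases hlt : PySem.List.pyGetD sa i 0 < PySem.List.pyGetD sb j 0
      · rw [solutionLoop, if_pos ⟨hi0, hj0⟩, if_pos hlt,
          ih (i - 1) (j - 1) (ans + 1) (by omega) (by omega) (by omega),
          hti, htj, hta, htb]
        rw [hga, hgb] at hlt
        have hii : ((i - 1) + 1).toNat = i.toNat := by omega
        have hjj : ((j - 1) + 1).toNat = j.toNat := by omega
        rw [hii, hjj]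
        simp only [List.reverse_append, List.reverse_cons, List.reverse_nil,
          List.nil_append, List.singleton_append]
        rw [frec, if_pos hlt]
        ring
      · rw [solutionLoop, if_pos ⟨hi0, hj0⟩, if_neg hlt,
          ih (i - 1) j ans (by omega) (by omega) hj,
          hti, htj, hta, htb]
        rw [hga, hgb] at hlt
        have hii : ((i - 1) + 1).toNat = i.toNat := by omega
        rw [hii]
        simp only [List.reverse_append, List.reverse_cons, List.reverse_nil,
          List.nil_append, List.singleton_append]
        rw [frec, if_neg hlt]
    · rw [solutionLoop, if_neg hpos]
      rcases (by omega : i < 0 ∨ j < 0) with h | h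
      · have : (i + 1).toNat = 0 := by omega
        simp [this, frec]
      · have : (j + 1).toNat = 0 := by omega
        simp [this, frec_nil_right]

-- ===== B-side lemmas =====

-- serving a block of equal b-values v: the xs (all < v) are consumed first-come
theorem rest_replicate (m : Nat) (xs a b : List Int) (v : Int)
    (hxs : ∀ x ∈ xs, x < v) (ha : ∀ y ∈ a, ¬ y < v) :
    rest (xs ++ a) (List.replicate m v ++ b) = rest (xs.drop m ++ a) b := by
  induction m generalizing xs with
  | zero => simp
  | succ m ih =>
    rw [List.replicate_succ]
    cases xs with
    | nil =>
      cases a with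
      | nil => simp [rest_nil_left]
      | cons z a' =>
        simp only [List.nil_append, List.cons_append, List.drop_nil] at *
        rw [show rest (z :: a') (v :: (List.replicate m v ++ b)) =
            rest (z :: a') (List.replicate m v ++ b) from by
          simp [rest, ha z (by simp)]]
        simpa using ih [] (by simp)
    | cons x xs' =>
      have hx : x < v := hxs x (by simp)
      simp only [List.cons_append, List.drop_succ_cons]
      rw [show rest (x :: (xs' ++ a)) (v :: (List.replicate m v ++ b)) =
          rest (xs' ++ a) (List.replicate m v ++ b) from by simp [rest, hx]]
      exact ih xs' (fun z hz => hxs z (by simp [hz]))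

-- a sorted list all ≥ v splits as the v-block followed by the rest
theorem sorted_min_decomp (a : List Int) (v : Int)
    (hs : a.Pairwise (fun p q : Int => p ≤ q)) (hge : ∀ x ∈ a, v ≤ x) :
    a = List.replicate (a.count v) v ++ a.filter (fun x => decide (x ≠ v)) := by
  induction a with
  | nil => simp
  | cons x t ih =>
    rw [List.pairwise_cons] at hs
    obtain ⟨hx, ht⟩ := hs
    by_cases hxv : x = v
    · subst hxv
      have hgt : ∀ y ∈ t, x ≤ y := hx
      rw [List.count_cons_self, List.replicate_succ]
      simp only [List.filter_cons, ne_eq, not_true_eq_false,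
        decide_false]
      simpa using ih ht hgt
    · have hvx : v < x := lt_of_le_of_ne (hge x (by simp)) (Ne.symm hxv)
      have hnot : v ∉ x :: t := by
        intro hmem
        rcases List.mem_cons.mp hmem with h | h
        · omega
        · have := hx v h; omega
      rw [List.count_eq_zero.mpr hnot]
      simp only [List.replicate, List.nil_append]
      symm
      rw [List.filter_eq_self]
      intro y hy
      rcases List.mem_cons.mp hy with h | h
      · simp [h, hxv]
      · have := hx y h
        simp
        omega

-- the counting sweep over the distinct values computes the greedy match count
theorem sweep_eq_gInt (vs : List Int) : ∀ (xs a b : List Int) (ans : Int)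
    (_hvs : vs.Pairwise (fun p q : Int => p < q))
    (_hxs : ∀ x ∈ xs, ∀ v ∈ vs, x < v)
    (_hxb : ∀ x ∈ xs, ∀ y ∈ b, x < y)
    (_hav : ∀ y ∈ a, y ∈ vs) (_hbv : ∀ y ∈ b, y ∈ vs)
    (_hsa : a.Pairwise (fun p q : Int => p ≤ q)) (_hsb : b.Pairwise (fun p q : Int => p ≤ q))
    (cA cB : Int → Int)
    (_hcA : ∀ v ∈ vs, cA v = (a.count v : Int)) (_hcB : ∀ v ∈ vs, cB v = (b.count v : Int)),
    (vs.foldl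
      (fun s v =>
        let m := min s.2 (cB v)
        (s.1 + m, s.2 + (cA v - m)))
      (ans, (xs.length : Int))).1 = ans + gInt (xs ++ a) b := by
  induction vs with
  | nil =>
    intro xs a b ans _ _ _ hav hbv _ _ cA cB _ _
    have ha0 : a = [] := List.eq_nil_iff_forall_not_mem.mpr (fun x hx => by simpa using hav x hx)
    have hb0 : b = [] := List.eq_nil_iff_forall_not_mem.mpr (fun x hx => by simpa using hbv x hx)
    simp [ha0, hb0, gInt, rest_nil_right]
  | cons v vs' ih =>
    intro xs a b ans hvs hxs hxb hav hbv hsa hsb cA cB hcA hcB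
    rw [List.pairwise_cons] at hvs
    obtain ⟨hv, hvs'⟩ := hvs
    have hminA : ∀ x ∈ a, v ≤ x := by
      intro x hx
      rcases List.mem_cons.mp (hav x hx) with h | h
      · omega
      · exact le_of_lt (hv x h)
    have hminB : ∀ x ∈ b, v ≤ x := by
      intro x hx
      rcases List.mem_cons.mp (hbv x hx) with h | h
      · omega
      · exact le_of_lt (hv x h)
    have ha_dec := sorted_min_decomp a v hsa hminA
    have hb_dec := sorted_min_decomp b v hsb hminB
    set a' := a.filter (fun x => decide (x ≠ v)) with ha'
    set b' := b.filter (fun x => decide (x ≠ v)) with hb'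
    set xs' := xs.drop (b.count v) ++ List.replicate (a.count v) v with hxs'
    have hcav : cA v = (a.count v : Int) := hcA v (by simp)
    have hcbv : cB v = (b.count v : Int) := hcB v (by simp)
    -- the state after the first step
    set m : Int := min ((xs.length : Int)) (cB v) with hm
    have hmval : m = ((min (b.count v) xs.length : Nat) : Int) := by
      rw [hm, hcbv]; push_cast; omega
    have hxslen : (xs.length : Int) + (cA v - m) = (xs'.length : Int) := by
      rw [hcav, hmval, hxs']
      simp only [List.length_append, List.length_drop, List.length_replicate]
      push_cast
      omega
    -- the greedy serves the v-block of b from xs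
    have hrest : rest (xs ++ a) b = rest (xs' ++ a') b' := by
      conv_lhs => rw [ha_dec, hb_dec]
      rw [rest_replicate (b.count v) xs (List.replicate (a.count v) v ++ a') b' v
          (fun x hx => hxs x hx v (by simp))
          (by
            intro y hy
            rcases List.mem_append.mp hy with h | h
            · have := List.eq_of_mem_replicate h; omega
            · have := hminA y (List.mem_of_mem_filter h); omega),
        ← List.append_assoc]
    have hlen_a : a.length = a.count v + a'.length := by
      conv_lhs => rw [ha_dec]
      simp
    have hkey : gInt (xs ++ a) b = m + gInt (xs' ++ a') b' := by
      unfold gInt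
      rw [hrest]
      have hxl : xs'.length = (xs.length - b.count v) + a.count v := by
        rw [hxs']; simp
      simp only [List.length_append]
      rw [hxl, hlen_a, hmval]
      push_cast
      omega
    rw [List.foldl_cons]
    show (List.foldl _ (ans + m, (xs.length : Int) + (cA v - m)) vs').1 = _
    rw [hxslen,
      ih xs' a' b' (ans + m) hvs'
        (by
          intro x hx w hw
          rcases List.mem_append.mp hx with h | h
          · exact hxs x (List.mem_of_mem_drop h) w (by simp [hw])
          · have := List.eq_of_mem_replicate h
            subst this
            exact hv w hw)
        (by
          intro x hx y hy
          have hyv : v < y := by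
            have hyb : y ∈ b := List.mem_of_mem_filter hy
            have : y ≠ v := by simpa using List.of_mem_filter hy
            have := hminB y hyb
            omega
          rcases List.mem_append.mp hx with h | h
          · have := hxs x (List.mem_of_mem_drop h) v (by simp)
            omega
          · have := List.eq_of_mem_replicate h
            omega)
        (by
          intro y hy
          have : y ≠ v := by simpa using List.of_mem_filter hy
          rcases List.mem_cons.mp (hav y (List.mem_of_mem_filter hy)) with h | h
          · omega
          · exact h)
        (by
          intro y hy
          have : y ≠ v := by simpa using List.of_mem_filter hy
          rcases List.mem_cons.mp (hbv y (List.mem_of_mem_filter hy)) with h | h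
          · omega
          · exact h)
        (List.Pairwise.sublist List.filter_sublist hsa)
        (List.Pairwise.sublist List.filter_sublist hsb)
        cA cB
        (by
          intro w hw
          have hwv : w ≠ v := by have := hv w hw; omega
          rw [hcA w (by simp [hw])]
          conv_lhs => rw [ha_dec]
          rw [List.count_append, List.count_replicate]
          simp
          omega)
        (by
          intro w hw
          have hwv : w ≠ v := by have := hv w hw; omega
          rw [hcB w (by simp [hw])]
          conv_lhs => rw [hb_dec]
          rw [List.count_append, List.count_replicate]
          simp
          omega),
      hkey]
    ring

-- ===== VERDICT (by name: the statement is the Claim_ definition above) =====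
theorem solution_spec : Claim_equal_solution := by
  unfold Claim_equal_solution Spec_solution
  intro A B _
  unfold solution solution_alt
  set sa := PySem.List.sorted A (fun x => x) false with hsa
  set sb := PySem.List.sorted B (fun x => x) false with hsb
  have hpa : sa.Pairwise (fun p q : Int => p ≤ q) := PySem.List.sorted_pairwise A _
  have hpb : sb.Pairwise (fun p q : Int => p ≤ q) := PySem.List.sorted_pairwise B _
  have hA : solutionLoop sa sb (sa.length + sb.length)
      (PySem.List.len sa - 1) (PySem.List.len sb - 1) 0 = gInt sa sb := by
    rw [solutionLoop_eq_frec sa sb (sa.length + sb.length) _ _ 0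
      (by simp only [PySem.List.len_eq]; omega)
      (by simp only [PySem.List.len_eq]; omega) (by simp only [PySem.List.len_eq]; omega)]
    have hta : (PySem.List.len sa - 1 + 1).toNat = sa.length := by
      simp [PySem.List.len_eq]
    have htb : (PySem.List.len sb - 1 + 1).toNat = sb.length := by
      simp [PySem.List.len_eq]
    rw [hta, htb, List.take_length, List.take_length,
      frec_eq_gInt sa.reverse sb.reverse
        (by rw [List.pairwise_reverse]; exact hpa)
        (by rw [List.pairwise_reverse]; exact hpb)]
    simp
  set ca := sa.foldl (fun d x => d.modify x 0 (· + 1)) (PySem.Dict.empty : PySem.Dict Int Int) with hca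
  set cb := sb.foldl (fun d x => d.modify x 0 (· + 1)) (PySem.Dict.empty : PySem.Dict Int Int) with hcb
  set vs := PySem.List.sorted (PySem.Set.union (PySem.Set.ofList sa) sb) (fun x => x) false with hvs
  have hcaD : ∀ v : Int, ca.getD v 0 = (sa.count v : Int) := by
    intro v
    rw [hca, PySem.Dict.getD_foldl_modify_add_one]
    simp [PySem.Dict.getD, PySem.Dict.get?, PySem.Dict.empty]
  have hcbD : ∀ v : Int, cb.getD v 0 = (sb.count v : Int) := by
    intro v
    rw [hcb, PySem.Dict.getD_foldl_modify_add_one]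
    simp [PySem.Dict.getD, PySem.Dict.get?, PySem.Dict.empty]
  have hnd : vs.Nodup := by
    have hp := PySem.List.sorted_perm (PySem.Set.union (PySem.Set.ofList sa) sb)
      (fun x : Int => x) false
    exact hp.symm.nodup (PySem.Set.nodup_union _ sb (PySem.Set.nodup_ofList sa))
  have hvslt : vs.Pairwise (fun p q : Int => p < q) := by
    have hle : vs.Pairwise (fun p q : Int => p ≤ q) := PySem.List.sorted_pairwise _ _
    exact (hnd.and hle).imp (fun h => lt_of_le_of_ne h.2 h.1)
  have hmema : ∀ y ∈ sa, y ∈ vs := by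
    intro y hy
    simp only [hvs, PySem.List.mem_sorted, PySem.Set.mem_union, PySem.Set.mem_ofList]
    exact Or.inl hy
  have hmemb : ∀ y ∈ sb, y ∈ vs := by
    intro y hy
    simp only [hvs, PySem.List.mem_sorted, PySem.Set.mem_union, PySem.Set.mem_ofList]
    exact Or.inr hy
  have hB := sweep_eq_gInt vs [] sa sb 0 hvslt (by simp) (by simp) hmema hmemb hpa hpb
    (fun v => ca.getD v 0) (fun v => cb.getD v 0)
    (fun v _ => hcaD v) (fun v _ => hcbD v)
  simp only [List.length_nil, Nat.cast_zero, List.nil_append, zero_add] at hB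
  rw [hA, ← hB]
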